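-- pv_equiv track=rewrite | github.com/jerydam/fauctdrop-backend | src/main.py | calculate_current_stage
-- ===== SOURCE A (Python) =====
-- from typing import Dict, Tuple, List, Optional, Any
--
-- def calculate_current_stage(stage_points: Dict[str, int], requirements: Dict[str, int]) -> str:
--     """Calculates the highest unlocked stage based on points."""
--     stages = ['Beginner', 'Intermediate', 'Advance', 'Legend', 'Ultimate']
--     current_stage = 'Beginner'
--
--     for i, stage in enumerate(stages):
--         # Default requirement to 0 if not set, strict inequality vs >= depends on your rules
--         req = requirements.get(stage, 0)
--         points = stage_points.get(stage, 0)
--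
--         if points >= req and req > 0:
--             # If we pass this stage, we are at least in the next stage (if it exists)
--             if i + 1 < len(stages):
--                 current_stage = stages[i + 1]
--             else:
--                 current_stage = stage # Max level
--         else:
--             # If we don't pass this stage, we stay at the current calculation
--             break
--
--     return current_stage
-- ===== SOURCE B (Python) =====
-- def calculate_current_stage(stage_points, requirements):
--     """Calculates the highest unlocked stage based on points."""
--     stages = ['Beginner', 'Intermediate', 'Advance', 'Legend', 'Ultimate']
--     # 0/1 flag per stage: requirement set and met
--     flags = [1 if (requirements.get(s, 0) > 0 and stage_points.get(s, 0) >= requirements.get(s, 0)) else 0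
--              for s in stages]
--     # run length of leading 1s as a sum of cumulative products (no break, no search)
--     acc = 1
--     count = 0
--     for f in flags:
--         acc *= f
--         count += acc
--     return stages[min(count, len(stages) - 1)]
-- ===== Notes on version B (the rewrite author's own statement) =====
-- stated objective: alternative
-- what changed: Replaces A's stateful scan with break and i+1 reassignment of current_stage by a branch-free arithmetic computation: build 0/1 cleared-flags for all five stages, obtain the leading-run length as the sum of cumulative products of the flags (no early exit, every stage visited), and index the stage list once with min(count, len-1).
import Mathlib
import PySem

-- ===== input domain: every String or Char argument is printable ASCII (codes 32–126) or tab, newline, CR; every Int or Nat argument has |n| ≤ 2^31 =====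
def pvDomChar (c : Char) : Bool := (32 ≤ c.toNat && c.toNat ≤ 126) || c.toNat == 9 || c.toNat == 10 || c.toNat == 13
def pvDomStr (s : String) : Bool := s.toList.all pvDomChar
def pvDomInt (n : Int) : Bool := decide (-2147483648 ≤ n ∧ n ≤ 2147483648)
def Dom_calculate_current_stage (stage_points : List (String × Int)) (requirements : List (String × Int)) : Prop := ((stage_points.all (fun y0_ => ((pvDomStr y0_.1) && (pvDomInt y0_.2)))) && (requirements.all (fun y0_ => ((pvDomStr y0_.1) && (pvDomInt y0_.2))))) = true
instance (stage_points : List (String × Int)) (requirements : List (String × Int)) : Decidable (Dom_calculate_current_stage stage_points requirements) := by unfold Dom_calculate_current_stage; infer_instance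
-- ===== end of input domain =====

-- B replaces A's stateful break-loop by a branch-free arithmetic pass: 0/1 flags for all
-- stages, run length = sum of cumulative products, then one index; objective: alternative.
-- ===== PORT A =====
-- literal port of A's for-loop: recursion over enumerate(stages) threading current_stage, break on failure
def pvLoopA (sp rq : PySem.Dict String Int) (stages : List String) :
    List (Int × String) → String → String
  | [], cur => cur
  | (i, stage) :: rest, cur =>
    let req := rq.getD stage 0
    let points := sp.getD stage 0
    if points ≥ req ∧ req > 0 then
      let cur' := if i + 1 < (stages.length : Int) then
          (PySem.List.pyGet? stages (i + 1)).getD cur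
        else stage
      pvLoopA sp rq stages rest cur'
    else cur

def calculate_current_stage (stage_points : List (String × Int)) (requirements : List (String × Int)) : String :=
  let stages := ["Beginner", "Intermediate", "Advance", "Legend", "Ultimate"]
  let cur := "Beginner"
  pvLoopA (PySem.Dict.ofList stage_points) (PySem.Dict.ofList requirements) stages
    (PySem.List.enumerate stages) cur

-- ===== PORT B =====
def calculate_current_stage_alt (stage_points : List (String × Int)) (requirements : List (String × Int)) : String :=
  let sp := PySem.Dict.ofList stage_points
  let rq := PySem.Dict.ofList requirements
  let stages := ["Beginner", "Intermediate", "Advance", "Legend", "Ultimate"]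
  -- flags = [1 if cleared else 0 for s in stages]
  let flags : List Int := stages.map (fun s =>
    if rq.getD s 0 > 0 ∧ sp.getD s 0 ≥ rq.getD s 0 then 1 else 0)
  -- acc = 1; count = 0; for f in flags: acc *= f; count += acc
  let p : Int × Int := flags.foldl (fun st f => (st.1 * f, st.2 + st.1 * f)) (1, 0)
  (PySem.List.pyGet? stages (min p.2 ((stages.length : Int) - 1))).getD ""

-- ===== PRECONDITION & SPEC =====
def Spec_calculate_current_stage (stage_points : List (String × Int)) (requirements : List (String × Int)) (out : String) : Prop := out = calculate_current_stage_alt stage_points requirements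
instance (stage_points : List (String × Int)) (requirements : List (String × Int)) (out : String) : Decidable (Spec_calculate_current_stage stage_points requirements out) := by unfold Spec_calculate_current_stage; infer_instance

-- ===== CLAIM (what is proved, stated in full; the proofs are below) =====
def Claim_equal_calculate_current_stage : Prop := ∀ (stage_points : List (String × Int)) (requirements : List (String × Int)), Dom_calculate_current_stage stage_points requirements → Spec_calculate_current_stage stage_points requirements (calculate_current_stage stage_points requirements)

-- ===== LEMMAS AND PROOFS =====

-- ===== VERDICT (by name: the statement is the Claim_ definition above) =====
set_option maxHeartbeats 2000000 in
theorem calculate_current_stage_spec : Claim_equal_calculate_current_stage := by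
  intro sp rq _
  unfold Spec_calculate_current_stage calculate_current_stage calculate_current_stage_alt
  simp only [PySem.List.enumerate_cons, PySem.List.enumerate_nil, List.map, List.foldl, pvLoopA, List.length_cons, List.length_nil]
  have hc : ∀ a b : Int, (a ≥ b ∧ b > 0) = (b > 0 ∧ a ≥ b) := fun a b => propext and_comm
  simp only [hc]
  split_ifs <;> first | decide | omega
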